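-- pv_equiv track=rewrite | github.com/Auriane90/LogicaProjeto01 | projeto01vr4.py | pegaValores
-- ===== SOURCE A (Python) =====
-- def atoms(arquivoPacientes):
--     resultado = []
--     for dado in arquivoPacientes:
--         for d in dado:
--             if d != '1' and d != '0':
--                 if d is not resultado:
--                     aux = d
--                     aux2 = aux.replace(' ', '')
--                     resultado.append(aux2)
--     return resultado
--
-- def pegaValores(arquivoPacientes):
--     resultado = []
--     variaveis = atoms(arquivoPacientes)
--     cont = len(variaveis)
--     aux = []
--     cont2 = 0
--     for dado in arquivoPacientes:
--         for d in dado: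
--             if d == '1' or d == '0':
--                 cont2 = cont2 + 1
--                 aux.append(d)
--                 if(cont2 == cont):
--                     resultado.append(aux)
--                     aux = []
--                     cont2 = 0
--     return resultado
-- ===== SOURCE B (Python) =====
-- def atoms(arquivoPacientes):
--     resultado = []
--     for dado in arquivoPacientes:
--         for d in dado:
--             if d != '1' and d != '0':
--                 if d is not resultado:
--                     aux = d
--                     aux2 = aux.replace(' ', '')
--                     resultado.append(aux2)
--     return resultado
--
-- def pegaValores(arquivoPacientes):
--     cont = len(atoms(arquivoPacientes))
--     if cont == 0:
--         return []
--     flat = [d for dado in arquivoPacientes for d in dado if d == '1' or d == '0']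
--     return [flat[i:i + cont] for i in range(0, len(flat) - cont + 1, cont)]
-- ===== Notes on version B (the rewrite author's own statement) =====
-- stated objective: simpler
-- what changed: Replaces A's incremental counter/aux-buffer accumulation inside the nested loop with a two-pass collect-then-slice shape: flatten all binary digits once, then cut the flat list into fixed-size chunks with range/slicing.
import Mathlib
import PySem

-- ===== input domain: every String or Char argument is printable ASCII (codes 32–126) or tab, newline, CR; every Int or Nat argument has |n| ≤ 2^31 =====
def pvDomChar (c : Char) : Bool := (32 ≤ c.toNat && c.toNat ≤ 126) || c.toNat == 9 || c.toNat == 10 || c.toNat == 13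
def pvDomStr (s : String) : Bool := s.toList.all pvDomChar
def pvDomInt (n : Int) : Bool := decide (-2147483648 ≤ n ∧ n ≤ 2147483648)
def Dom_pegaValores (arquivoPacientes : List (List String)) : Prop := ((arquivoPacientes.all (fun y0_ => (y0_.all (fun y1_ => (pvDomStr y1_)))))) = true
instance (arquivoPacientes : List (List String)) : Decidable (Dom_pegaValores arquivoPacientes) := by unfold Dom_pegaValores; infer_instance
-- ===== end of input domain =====

-- B simplifies A's incremental counter/aux-buffer chunking into collect-all-binary-digits then slice into
-- fixed-size chunks; same return value (no speed claim).

-- ===== PORT A =====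
-- helper 'atoms' (both Pythons contain this identical helper; 'if d is not resultado' compares a str with a
-- list by identity and is always True, so it is omitted as a no-op guard)
def atoms (arquivoPacientes : List (List String)) : List String :=
  arquivoPacientes.foldl (fun resultado dado =>
    dado.foldl (fun resultado d =>
      if !(d == "1") && !(d == "0") then
        resultado ++ [PySem.Str.replace d " " ""]
      else resultado) resultado) []

def pegaValores (arquivoPacientes : List (List String)) : List (List String) :=
  let variaveis := atoms arquivoPacientes
  let cont := variaveis.length
  -- state: (resultado, aux, cont2)
  let fin := arquivoPacientes.foldl (fun st dado =>
    dado.foldl (fun (st : List (List String) × List String × Nat) d =>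
      if d == "1" || d == "0" then
        let cont2 := st.2.2 + 1
        let aux := st.2.1 ++ [d]
        if cont2 = cont then (st.1 ++ [aux], ([] : List String), 0)
        else (st.1, aux, cont2)
      else st) st)
    (([] : List (List String)), ([] : List String), (0 : Nat))
  fin.1

-- ===== PORT B =====
def pegaValores_alt (arquivoPacientes : List (List String)) : List (List String) :=
  let cont := (atoms arquivoPacientes).length
  if cont = 0 then []
  else
    let flat := arquivoPacientes.flatMap (fun dado => dado.filter (fun d => d == "1" || d == "0"))
    (PySem.List.pyRange 0 ((flat.length : Int) - (cont : Int) + 1) (cont : Int)).map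
      (fun i => PySem.List.slice flat (some i) (some (i + (cont : Int))))

-- ===== PRECONDITION & SPEC =====
def Spec_pegaValores (arquivoPacientes : List (List String)) (out : List (List String)) : Prop := out = pegaValores_alt arquivoPacientes
instance (arquivoPacientes : List (List String)) (out : List (List String)) : Decidable (Spec_pegaValores arquivoPacientes out) := by unfold Spec_pegaValores; infer_instance

-- ===== CLAIM (what is proved, stated in full; the proofs are below) =====
def Claim_equal_pegaValores : Prop := ∀ (arquivoPacientes : List (List String)), Dom_pegaValores arquivoPacientes → Spec_pegaValores arquivoPacientes (pegaValores arquivoPacientes)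

-- ===== LEMMAS AND PROOFS =====

-- the unconditional body of A's inner loop (applied exactly to the binary digits)
def chunkStep (cont : Nat) (st : List (List String) × List String × Nat) (d : String) :
    List (List String) × List String × Nat :=
  let cont2 := st.2.2 + 1
  let aux := st.2.1 ++ [d]
  if cont2 = cont then (st.1 ++ [aux], ([] : List String), 0) else (st.1, aux, cont2)

-- reference chunking: full-size chunks of `cont`, trailing partial chunk dropped
def chunks (cont : Nat) (bs : List String) : List (List String) :=
  if h : cont = 0 ∨ bs.length < cont then []
  else bs.take cont :: chunks cont (bs.drop cont)
termination_by bs.length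
decreasing_by
  simp only [List.length_drop]; omega

lemma chunks_of_lt {cont : Nat} {bs : List String} (hlt : bs.length < cont) :
    chunks cont bs = [] := by
  rw [chunks]; simp [hlt]

lemma chunks_of_le {cont : Nat} {bs : List String} (hc : 0 < cont) (h : cont ≤ bs.length) :
    chunks cont bs = bs.take cont :: chunks cont (bs.drop cont) := by
  rw [chunks]; simp only [dite_eq_ite, ite_eq_right_iff]
  intro hbad; exfalso; omega

lemma foldl_chunkStep_zero (bs : List String) (res : List (List String))
    (aux : List String) (c2 : Nat) :
    (bs.foldl (chunkStep 0) (res, aux, c2)).1 = res := by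
  induction bs generalizing aux c2 with
  | nil => rfl
  | cons b bs ih => simp [List.foldl_cons, chunkStep]; exact ih _ _

lemma foldl_chunkStep_spec (cont : Nat) (hc : 0 < cont) (bs : List String) :
    ∀ (res : List (List String)) (aux : List String), aux.length < cont →
    (bs.foldl (chunkStep cont) (res, aux, aux.length)).1 = res ++ chunks cont (aux ++ bs) := by
  induction bs with
  | nil =>
    intro res aux ha
    simp [List.foldl_nil, chunks_of_lt (by simpa using ha)]
  | cons b bs ih =>
    intro res aux ha
    simp only [List.foldl_cons, chunkStep]
    by_cases hfull : aux.length + 1 = cont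
    · rw [if_pos hfull]
      have h0 : (0 : Nat) = ([] : List String).length := rfl
      rw [h0, ih (res ++ [aux ++ [b]]) [] (by simpa using hc)]
      have hlen : (aux ++ [b]).length = cont := by simpa using hfull
      have hrw : chunks cont (aux ++ b :: bs) = (aux ++ [b]) :: chunks cont bs := by
        have heq : aux ++ b :: bs = (aux ++ [b]) ++ bs := by simp
        rw [heq, chunks_of_le hc (by simp only [List.length_append, hlen]; omega)]
        rw [List.take_left' hlen, List.drop_left' hlen]
      rw [hrw]
      simp
    · simp only [if_neg hfull]
      have hlen : (aux ++ [b]).length = aux.length + 1 := by simp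
      have : aux.length + 1 = (aux ++ [b]).length := hlen.symm
      rw [this, ih res (aux ++ [b]) (by simp; omega)]
      simp

-- number of full chunks
lemma range_map_chunks (cont : Nat) (hc : 0 < cont) (bs : List String) :
    (List.range (if cont ≤ bs.length then (bs.length - cont) / cont + 1 else 0)).map
      (fun k => (bs.drop (cont * k)).take cont) = chunks cont bs := by
  by_cases h : cont ≤ bs.length
  · rw [if_pos h, List.range_succ_eq_map, chunks_of_le hc h]
    simp only [List.map_cons, Nat.mul_zero, List.drop_zero, List.map_map]
    congr 1
    have hrec := range_map_chunks cont hc (bs.drop cont)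
    have hn : (if cont ≤ (bs.drop cont).length then ((bs.drop cont).length - cont) / cont + 1 else 0)
        = (bs.length - cont) / cont := by
      simp only [List.length_drop]
      by_cases h2 : cont ≤ bs.length - cont
      · rw [if_pos h2, (Nat.div_eq_sub_div hc h2).symm]
      · rw [if_neg h2, Nat.div_eq_of_lt (by omega)]
    rw [hn] at hrec
    rw [← hrec]
    apply List.map_congr_left
    intro k _
    simp only [Function.comp_apply, List.drop_drop]
    congr 2
    simp [Nat.mul_succ, Nat.add_comm]
  · rw [if_neg h, List.range_zero, List.map_nil, chunks_of_lt (by omega)]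
termination_by bs.length
decreasing_by
  simp only [List.length_drop]; omega

lemma pyRange_map_slice (cont : Nat) (hc : 0 < cont) (bs : List String) :
    (PySem.List.pyRange 0 ((bs.length : Int) - (cont : Int) + 1) (cont : Int)).map
      (fun i => PySem.List.slice bs (some i) (some (i + (cont : Int)))) = chunks cont bs := by
  rw [PySem.List.pyRange_of_pos 0 _ (by exact_mod_cast hc), List.map_map]
  have hif : (if (0:Int) < (bs.length : Int) - (cont : Int) + 1 then
      ((((bs.length : Int) - (cont : Int) + 1) - 0 + (cont : Int) - 1) / (cont : Int)).toNat else 0)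
      = (if cont ≤ bs.length then (bs.length - cont) / cont + 1 else 0) := by
    by_cases h : cont ≤ bs.length
    · rw [if_pos (by omega), if_pos h]
      have : ((bs.length : Int) - (cont : Int) + 1) - 0 + (cont : Int) - 1 = (bs.length : Int) := by ring
      rw [this, ← Int.natCast_div]
      simp only [Int.toNat_natCast]
      exact Nat.div_eq_sub_div hc h
    · rw [if_neg (by omega), if_neg h]
  rw [hif, ← range_map_chunks cont hc bs]
  apply List.map_congr_left
  intro k _
  simp only [Function.comp_apply, zero_add]
  have hcast : (cont : Int) * (k : Nat) = ((cont * k : Nat) : Int) := by push_cast; ring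
  rw [hcast]
  have := PySem.List.slice_natCast_add bs (cont * k) cont
  simpa using this

-- ===== VERDICT (by name: the statement is the Claim_ definition above) =====
theorem pegaValores_spec : Claim_equal_pegaValores := by
  intro xs _
  show pegaValores xs = pegaValores_alt xs
  show (xs.foldl (fun st dado =>
      dado.foldl (fun (st : List (List String) × List String × Nat) d =>
        if d == "1" || d == "0" then chunkStep ((atoms xs).length) st d else st) st)
      (([] : List (List String)), ([] : List String), (0 : Nat))).1
    = (if (atoms xs).length = 0 then []
       else
        let flat := xs.flatMap (fun dado => dado.filter (fun d => d == "1" || d == "0"))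
        (PySem.List.pyRange 0 ((flat.length : Int) - ((atoms xs).length : Int) + 1) ((atoms xs).length : Int)).map
          (fun i => PySem.List.slice flat (some i) (some (i + ((atoms xs).length : Int)))))
  set cont := (atoms xs).length with hcont
  set flat := xs.flatMap (fun dado => dado.filter (fun d => d == "1" || d == "0")) with hflatdef
  have hflat : (flat.foldl (chunkStep cont)
      (([] : List (List String)), ([] : List String), (0 : Nat)))
      = xs.foldl (fun st dado =>
          dado.foldl (fun (st : List (List String) × List String × Nat) d =>
            if d == "1" || d == "0" then chunkStep cont st d else st) st)
        (([] : List (List String)), ([] : List String), (0 : Nat)) := by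
    rw [hflatdef, List.foldl_flatMap]
    simp only [List.foldl_filter]
  rw [← hflat]
  by_cases hc : cont = 0
  · rw [if_pos hc, hc]
    exact foldl_chunkStep_zero flat [] [] 0
  · rw [if_neg hc]
    have h0 := foldl_chunkStep_spec cont (Nat.pos_of_ne_zero hc) flat [] [] (Nat.pos_of_ne_zero hc)
    simp only [List.nil_append] at h0
    rw [show ([] : List String).length = 0 from rfl] at h0
    rw [h0, pyRange_map_slice cont (Nat.pos_of_ne_zero hc) flat]
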